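-- pv_equiv track=rewrite | github.com/jarvislam1999/CMSSW-12100-Homework | pp/kattis/trainpassengers.py | solve
-- ===== SOURCE A (Python) =====
-- def solve(C, stations):
--     """
--     Parameters:
--      - C: Integer. The capacity of the train.
--      - stations: List of tuples. Each tuple represents a station the train stopped in.
--                  The tuple contains three integers: the number of people that left the
--                  train, entered the train, and had to stay at a station
--
--     Returns: Boolean. True if the measurements are consistent, False otherwise
--     """
--
--     # YOUR CODE HERE
--     if (stations[0][0] != 0):
--         return False
--     if (stations[len(stations) - 1][len(stations[0]) - 1] != 0):
--         return False
--     people = 0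
--     for station in stations:
--         people -= station[0]
--         people += station[1]
--         if (people < 0):
--             return False
--         if (people < C and station[2] > 0):
--             return False
--         if (people > C):
--             return False
--     # Replace True with your return value
--     return True
-- ===== SOURCE B (Python) =====
-- def solve(C, stations):
--     # Different traversal: precompute the final onboard total with sum(),
--     # then walk the stations BACK-TO-FRONT, undoing each station's delta,
--     # and check occupancy bounds plus "nobody may be left behind unless
--     # the train is exactly full" at each stop.
--     if stations[0][0] != 0 or stations[-1][2] != 0:
--         return False
--     p = sum(entered - left for left, entered, _ in stations)
--     for left, entered, stay in reversed(stations):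
--         if p < 0 or p > C or (stay > 0 and p != C):
--             return False
--         p -= entered - left
--     return True
-- ===== Notes on version B (the rewrite author's own statement) =====
-- stated objective: alternative
-- what changed: B precomputes the final onboard total with sum() and then validates the stations in reverse order, undoing each station's delta while checking bounds and an exactly-full condition, instead of A's single forward early-return loop accumulating the running occupancy.
import Mathlib
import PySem

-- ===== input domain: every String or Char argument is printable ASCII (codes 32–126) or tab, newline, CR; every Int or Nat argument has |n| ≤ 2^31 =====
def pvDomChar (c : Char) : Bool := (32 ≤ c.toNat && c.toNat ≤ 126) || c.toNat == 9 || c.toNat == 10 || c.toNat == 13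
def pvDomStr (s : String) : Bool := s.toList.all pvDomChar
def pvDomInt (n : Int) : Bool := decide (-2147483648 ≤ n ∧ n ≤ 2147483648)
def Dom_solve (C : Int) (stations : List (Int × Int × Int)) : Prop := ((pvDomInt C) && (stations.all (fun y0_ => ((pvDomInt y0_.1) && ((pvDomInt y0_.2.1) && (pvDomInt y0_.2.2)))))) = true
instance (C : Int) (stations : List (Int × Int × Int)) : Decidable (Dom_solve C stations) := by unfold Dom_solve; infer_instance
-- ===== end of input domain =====

-- B replaces A's forward early-return occupancy loop by: precompute the final onboard
-- total, then validate the stations back-to-front, undoing each delta (objective: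
-- alternative, same O(n) cost).

-- ===== PORT A =====
-- A's for-loop over stations with the running `people` accumulator and early returns.
def solveLoop (C : Int) : Int → List (Int × Int × Int) → Bool
  | _, [] => true
  | people, s :: rest =>
    let p := people - s.1 + s.2.1
    if p < 0 then false
    else if p < C && s.2.2 > 0 then false
    else if p > C then false
    else solveLoop C p rest

def solve (C : Int) (stations : List (Int × Int × Int)) : Bool :=
  match stations with
  | [] => false  -- Python raises IndexError on stations[0]; excluded by Pre_solve
  | s0 :: _ =>
    if s0.1 ≠ 0 then false
    else if (stations.getLast?.getD (0, 0, 0)).2.2 ≠ 0 then false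
    else solveLoop C 0 stations

-- ===== PORT B =====
-- Source B's sum(entered - left for ...) over the stations.
def sumDelta : List (Int × Int × Int) → Int
  | [] => 0
  | s :: rest => (s.2.1 - s.1) + sumDelta rest

-- Source B's backward for-loop over reversed(stations): check, then undo the delta.
def revLoop (C : Int) : Int → List (Int × Int × Int) → Bool
  | _, [] => true
  | p, s :: rest =>
    if p < 0 || C < p || (s.2.2 > 0 && p != C) then false
    else revLoop C (p - (s.2.1 - s.1)) rest

def solve_alt (C : Int) (stations : List (Int × Int × Int)) : Bool :=
  match stations with
  | [] => false  -- Python raises IndexError on stations[0]; excluded by Pre_solve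
  | s0 :: _ =>
    if s0.1 != 0 || (stations.getLast?.getD (0, 0, 0)).2.2 != 0 then false
    else revLoop C (sumDelta stations) stations.reverse

-- ===== PRECONDITION & SPEC =====
-- Pre_ excludes only the empty station list, on which both Pythons raise IndexError.
def Pre_solve (C : Int) (stations : List (Int × Int × Int)) : Prop := stations ≠ []
instance (C : Int) (stations : List (Int × Int × Int)) : Decidable (Pre_solve C stations) := by unfold Pre_solve; infer_instance
def pvWitness_solve : Int × (List (Int × Int × Int)) := (2, [(0, 2, 0), (1, 1, 0), (2, 0, 0)])

def Spec_solve (C : Int) (stations : List (Int × Int × Int)) (out : Bool) : Prop := out = solve_alt C stations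
instance (C : Int) (stations : List (Int × Int × Int)) (out : Bool) : Decidable (Spec_solve C stations out) := by unfold Spec_solve; infer_instance

-- ===== CLAIM =====
def Claim_equal_solve : Prop := ∀ (C : Int) (stations : List (Int × Int × Int)), Dom_solve C stations → Pre_solve C stations → Spec_solve C stations (solve C stations)

-- ===== LEMMAS AND PROOFS =====
-- Forward occupancy table (proof device: the prefix sums A's loop visits).
def occTable : Int → List (Int × Int × Int) → List Int
  | _, [] => []
  | p, s :: rest => (p + (s.2.1 - s.1)) :: occTable (p + (s.2.1 - s.1)) rest

-- Occupancies B's backward loop visits, going down from p.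
def occR : Int → List (Int × Int × Int) → List Int
  | _, [] => []
  | p, s :: rest => p :: occR (p - (s.2.1 - s.1)) rest

theorem loop_eq_table (C : Int) (stations : List (Int × Int × Int)) : ∀ people : Int,
    solveLoop C people stations
      = (stations.zip (occTable people stations)).all (fun sp =>
          0 ≤ sp.2 && sp.2 ≤ C && !(sp.1.2.2 > 0 && sp.2 < C)) := by
  induction stations with
  | nil => intro people; rfl
  | cons s rest ih =>
    intro people
    simp only [solveLoop, occTable, List.zip_cons_cons, List.all_cons, ih]
    have e : people + (s.2.1 - s.1) = people - s.1 + s.2.1 := by ring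
    rw [e]
    by_cases h1 : people - s.1 + s.2.1 < 0
    · simp [h1, show ¬(0 ≤ people - s.1 + s.2.1) by omega]
    · by_cases h3 : C < people - s.1 + s.2.1
      · simp [h1, h3, show ¬(people - s.1 + s.2.1 ≤ C) by omega]
      · simp [h1, h3, show 0 ≤ people - s.1 + s.2.1 by omega,
          show people - s.1 + s.2.1 ≤ C by omega, Bool.or_comm, Bool.and_assoc]

theorem revLoop_eq_table (C : Int) (l : List (Int × Int × Int)) : ∀ p : Int,
    revLoop C p l
      = (l.zip (occR p l)).all (fun sp =>
          !(sp.2 < 0 || C < sp.2 || (sp.1.2.2 > 0 && sp.2 != C))) := by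
  induction l with
  | nil => intro p; rfl
  | cons s rest ih =>
    intro p
    simp only [revLoop, occR, List.zip_cons_cons, List.all_cons, ih]
    by_cases h : (decide (p < 0) || decide (C < p) || (decide (s.2.2 > 0) && (p != C))) = true
    · simp [h]
    · simp [h]

theorem sumDelta_append (l : List (Int × Int × Int)) (s : Int × Int × Int) :
    sumDelta (l ++ [s]) = sumDelta l + (s.2.1 - s.1) := by
  induction l with
  | nil => simp [sumDelta]
  | cons t r ih => simp [sumDelta, ih]; omega

theorem sumDelta_reverse (l : List (Int × Int × Int)) :
    sumDelta l.reverse = sumDelta l := by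
  induction l with
  | nil => rfl
  | cons t r ih =>
    simp [List.reverse_cons, sumDelta_append, ih, sumDelta]; omega

theorem occR_append (s : Int × Int × Int) : ∀ (l : List (Int × Int × Int)) (p : Int),
    occR p (l ++ [s]) = occR p l ++ [p - sumDelta l] := by
  intro l
  induction l with
  | nil => intro p; simp [occR, sumDelta]
  | cons t r ih =>
    intro p
    simp only [List.cons_append, occR, ih, sumDelta, List.cons_append]
    congr 3
    omega

theorem occR_reverse (l : List (Int × Int × Int)) : ∀ people : Int,
    occR (people + sumDelta l) l.reverse = (occTable people l).reverse := by
  induction l with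
  | nil => intro people; rfl
  | cons s r ih =>
    intro people
    simp only [List.reverse_cons, occTable, occR_append, sumDelta]
    have e1 : people + ((s.2.1 - s.1) + sumDelta r) = (people + (s.2.1 - s.1)) + sumDelta r := by ring
    rw [e1, ih (people + (s.2.1 - s.1))]
    rw [sumDelta_reverse]
    congr 2
    omega

theorem occTable_length (l : List (Int × Int × Int)) : ∀ p : Int,
    (occTable p l).length = l.length := by
  induction l with
  | nil => intro p; rfl
  | cons s r ih => intro p; simp [occTable, ih]

theorem zip_reverse {α β : Type} (l₁ : List α) (l₂ : List β) (h : l₁.length = l₂.length) :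
    l₁.reverse.zip l₂.reverse = (l₁.zip l₂).reverse := by
  induction l₁ generalizing l₂ with
  | nil => cases l₂ <;> simp_all
  | cons a l ih =>
    cases l₂ with
    | nil => simp_all
    | cons b m =>
      simp only [List.length_cons, Nat.succ.injEq] at h
      simp only [List.reverse_cons]
      rw [List.zip_append (by simp [h]), ih m h]
      simp

theorem pointwise_eq (C : Int) (sp : (Int × Int × Int) × Int) :
    (0 ≤ sp.2 && sp.2 ≤ C && !(sp.1.2.2 > 0 && sp.2 < C))
      = !(sp.2 < 0 || C < sp.2 || (sp.1.2.2 > 0 && sp.2 != C)) := by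
  rw [Bool.eq_iff_iff]
  simp only [Bool.and_eq_true, Bool.not_eq_true', Bool.or_eq_false_iff,
    Bool.and_eq_false_iff, decide_eq_true_eq, decide_eq_false_iff_not,
    bne_eq_false_iff_eq, gt_iff_lt]
  omega

theorem loops_agree (C : Int) (stations : List (Int × Int × Int)) :
    solveLoop C 0 stations = revLoop C (sumDelta stations) stations.reverse := by
  rw [loop_eq_table, revLoop_eq_table]
  have h0 : sumDelta stations = 0 + sumDelta stations := by ring
  rw [h0, occR_reverse stations 0,
    zip_reverse _ _ (by rw [occTable_length]), List.all_reverse]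
  have hf : (fun sp : (Int × Int × Int) × Int =>
      0 ≤ sp.2 && sp.2 ≤ C && !(sp.1.2.2 > 0 && sp.2 < C))
      = (fun sp : (Int × Int × Int) × Int =>
      !(sp.2 < 0 || C < sp.2 || (sp.1.2.2 > 0 && sp.2 != C))) :=
    funext (pointwise_eq C)
  rw [hf]

theorem solve_spec_aux (C : Int) (stations : List (Int × Int × Int))
    (h : stations ≠ []) : solve C stations = solve_alt C stations := by
  match stations with
  | s0 :: rest =>
    simp only [solve, solve_alt, loops_agree]
    split_ifs with h1 h2 <;> simp_all

-- ===== VERDICT =====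
theorem solve_spec : Claim_equal_solve := by
  intro C stations _ hpre
  unfold Spec_solve
  exact solve_spec_aux C stations hpre
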